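-- pv_equiv track=rewrite | github.com/kagenti/agent-toolkit | apps/agentstack-cli/src/agentstack_cli/commands/platform.py | parse_scoped_set_values
-- ===== SOURCE A (Python) =====
-- CHART_PREFIXES = ("kagenti-deps:", "kagenti:", "agentstack:")
--
-- def parse_scoped_set_values(set_values_list: list[str]) -> dict[str, list[str]]:
--     """Split --set values by chart prefix. Unprefixed defaults to 'agentstack'."""
--     result: dict[str, list[str]] = {"agentstack": [], "kagenti": [], "kagenti-deps": []}
--     for value in set_values_list:
--         for prefix in CHART_PREFIXES:
--             if value.startswith(prefix):
--                 result[prefix.rstrip(":")].append(value[len(prefix) :])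
--                 break
--         else:
--             result["agentstack"].append(value)
--     return result
-- ===== SOURCE B (Python) =====
-- def parse_scoped_set_values(set_values_list: list[str]) -> dict[str, list[str]]:
--     """Split --set values by chart prefix. Unprefixed defaults to 'agentstack'."""
--     result: dict[str, list[str]] = {"agentstack": [], "kagenti": [], "kagenti-deps": []}
--     for value in set_values_list:
--         head, sep, rest = value.partition(":")
--         if sep and head in result:
--             result[head].append(rest)
--         else:
--             result["agentstack"].append(value)
--     return result
-- ===== Notes on version B (the rewrite author's own statement) =====
-- stated objective: simpler
-- what changed: Replaces the inner startswith-scan over the prefix tuple (with for/else and rstrip) by a single partition at the first colon plus a dict-key membership test, so the inner loop disappears.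
import Mathlib
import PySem

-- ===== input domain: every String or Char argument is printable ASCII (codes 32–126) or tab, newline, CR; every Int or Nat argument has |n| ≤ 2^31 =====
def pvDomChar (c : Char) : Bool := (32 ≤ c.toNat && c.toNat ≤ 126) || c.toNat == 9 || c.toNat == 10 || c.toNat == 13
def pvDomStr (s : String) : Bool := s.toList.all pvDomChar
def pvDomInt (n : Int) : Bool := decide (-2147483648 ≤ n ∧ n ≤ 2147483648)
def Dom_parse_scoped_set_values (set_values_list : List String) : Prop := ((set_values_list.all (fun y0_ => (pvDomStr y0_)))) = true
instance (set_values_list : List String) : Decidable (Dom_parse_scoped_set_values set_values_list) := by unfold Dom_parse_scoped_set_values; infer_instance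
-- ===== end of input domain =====

-- B replaces A's inner startswith-scan over the prefix tuple by a single partition at the
-- first colon plus a dict-key membership test (objective: simpler).


-- ===== PORT A =====
-- CHART_PREFIXES = ("kagenti-deps:", "kagenti:", "agentstack:")
def pvChartPrefixes : List String := ["kagenti-deps:", "kagenti:", "agentstack:"]

-- the initial dict {"agentstack": [], "kagenti": [], "kagenti-deps": []}
def pvInit : PySem.Dict String (List String) :=
  ((PySem.Dict.empty.insert "agentstack" []).insert "kagenti" []).insert "kagenti-deps" []

-- exact hand port of s.rstrip(":"): drop trailing ':' characters
def pvRstripColon (s : String) : String :=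
  String.ofList ((s.toList.reverse.dropWhile (· == ':')).reverse)

-- the inner `for prefix in CHART_PREFIXES: … break / else: …` loop
def pvInnerA (value : String) :
    List String → PySem.Dict String (List String) → PySem.Dict String (List String)
  | [], d => d.modify "agentstack" [] (· ++ [value])
  | p :: ps, d =>
    if PySem.Str.startswith value p then
      d.modify (pvRstripColon p) [] (· ++ [PySem.Str.slice value (some (PySem.Str.len p)) none])
    else pvInnerA value ps d

def parse_scoped_set_values (set_values_list : List String) : List (String × List String) :=
  (set_values_list.foldl (fun d v => pvInnerA v pvChartPrefixes d) pvInit).items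

-- ===== PORT B =====
-- head, sep, rest = value.partition(":"): hand port of str.partition with a one-char
-- separator, exact — split at the first ':' (sep is empty iff no ':' occurs)
def pvStepB (d : PySem.Dict String (List String)) (value : String) :
    PySem.Dict String (List String) :=
  let head := String.ofList (value.toList.takeWhile (· ≠ ':'))
  match value.toList.dropWhile (· ≠ ':') with
  | _ :: rest =>
    if d.contains head then d.modify head [] (· ++ [String.ofList rest])
    else d.modify "agentstack" [] (· ++ [value])
  | [] => d.modify "agentstack" [] (· ++ [value])

def parse_scoped_set_values_alt (set_values_list : List String) : List (String × List String) :=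
  (set_values_list.foldl pvStepB pvInit).items

-- ===== PRECONDITION & SPEC =====
def Spec_parse_scoped_set_values (set_values_list : List String) (out : List (String × List String)) : Prop := out = parse_scoped_set_values_alt set_values_list
instance (set_values_list : List String) (out : List (String × List String)) : Decidable (Spec_parse_scoped_set_values set_values_list out) := by unfold Spec_parse_scoped_set_values; infer_instance

-- ===== CLAIM (what is proved, stated in full; the proofs are below) =====
def Claim_equal_parse_scoped_set_values : Prop := ∀ (set_values_list : List String), Dom_parse_scoped_set_values set_values_list → Spec_parse_scoped_set_values set_values_list (parse_scoped_set_values set_values_list)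

-- ===== LEMMAS AND PROOFS =====

-- the three result keys, in insertion order
def pvKeys : List String := ["agentstack", "kagenti", "kagenti-deps"]

-- span of a list of the shape q ++ ':' :: rest with ':' ∉ q
theorem pv_takeWhile_span (q rest : List Char) (hq : (':' : Char) ∉ q) :
    (q ++ ':' :: rest).takeWhile (· ≠ ':') = q ∧
    (q ++ ':' :: rest).dropWhile (· ≠ ':') = ':' :: rest := by
  induction q with
  | nil => simp
  | cons c cs ih =>
    have hc : c ≠ ':' := fun h => hq (by simp [h])
    obtain ⟨h1, h2⟩ := ih (fun h => hq (by simp [h]))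
    rw [List.cons_append, List.takeWhile_cons, List.dropWhile_cons]
    have hcd : (decide (c ≠ ':')) = true := by simp [hc]
    rw [hcd, if_pos rfl, if_pos rfl, h1, h2]
    exact ⟨rfl, rfl⟩

-- prefix characterisation: a colon-free word followed by ':' is a prefix iff it is the span head
theorem pv_prefix_iff (q h rest : List Char) (hq : (':' : Char) ∉ q) (hh : (':' : Char) ∉ h) :
    ((q ++ [':']) <+: (h ++ ':' :: rest)) ↔ q = h := by
  constructor
  · rintro ⟨u, hu⟩
    have h1 : ((q ++ [':']) ++ u).takeWhile (· ≠ ':') = q := by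
      have := pv_takeWhile_span q u hq
      simpa using this.1
    have hh' := (pv_takeWhile_span h rest hh).1
    rw [hu, hh'] at h1
    exact h1.symm
  · rintro rfl
    exact ⟨rest, by simp⟩

-- a prefix ending in ':' of a colon-free list is impossible
theorem pv_no_prefix_of_no_colon (q h : List Char) (hh : (':' : Char) ∉ h) :
    ¬ ((q ++ [':']) <+: h) := by
  intro hp
  exact hh (hp.sublist.mem (by simp))

-- per-element equality of the two loop bodies (on a dict carrying the three result keys)
theorem pv_step_eq (v : String) (d : PySem.Dict String (List String)) (hk : d.keys = pvKeys) :
    pvInnerA v pvChartPrefixes d = pvStepB d v := by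
  have hcont : ∀ s : String, d.contains s = decide (s ∈ pvKeys) := by
    intro s
    by_cases hs : s ∈ pvKeys
    · simp [hs, (PySem.Dict.contains_iff_mem_keys d s).2 (hk ▸ hs)]
    · simp only [hs, decide_false]
      by_contra hc
      exact hs (hk ▸ (PySem.Dict.contains_iff_mem_keys d s).1 (by simpa using hc))
  obtain hsplit := (List.takeWhile_append_dropWhile (p := (· ≠ ':')) (l := v.toList)).symm
  set h := v.toList.takeWhile (· ≠ ':') with hh_def
  have hh : (':' : Char) ∉ h := by
    intro hmem
    have := List.mem_takeWhile_imp hmem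
    simp at this
  cases ht : v.toList.dropWhile (· ≠ ':') with
  | nil =>
    -- no colon in v: every startswith test is false; both sides append v under "agentstack"
    have hv : v.toList = h := by rw [hsplit, ht]; simp
    have hfalse : ∀ (q : List Char), ¬ ((q ++ [':']) <+: v.toList) := by
      intro q hp; rw [hv] at hp; exact pv_no_prefix_of_no_colon q h hh hp
    have e1 : PySem.Str.startswith v "kagenti-deps:" = false := by
      rw [← Bool.not_eq_true]
      simp only [PySem.Str.startswith_eq, PySem.Chars.startswith_iff]
      exact hfalse "kagenti-deps".toList
    have e2 : PySem.Str.startswith v "kagenti:" = false := by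
      rw [← Bool.not_eq_true]
      simp only [PySem.Str.startswith_eq, PySem.Chars.startswith_iff]
      exact hfalse "kagenti".toList
    have e3 : PySem.Str.startswith v "agentstack:" = false := by
      rw [← Bool.not_eq_true]
      simp only [PySem.Str.startswith_eq, PySem.Chars.startswith_iff]
      exact hfalse "agentstack".toList
    simp only [pvInnerA, pvChartPrefixes, e1, e2, e3, Bool.false_eq_true, if_false,
      pvStepB, ht]
  | cons c rest =>
    have hc : c = ':' := by
      have hne : v.toList.dropWhile (· ≠ ':') ≠ [] := by rw [ht]; simp
      have h0 := List.head_dropWhile_not (p := (· ≠ ':')) (l := v.toList) hne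
      simp only [ht, List.head_cons] at h0
      simpa using h0
    subst hc
    have hv : v.toList = h ++ ':' :: rest := by rw [hsplit, ht]
    have hiff : ∀ (q : List Char), (':' : Char) ∉ q →
        (((q ++ [':']) <+: v.toList) ↔ q = h) := by
      intro q hq; rw [hv]; exact pv_prefix_iff q h rest hq hh
    have hsw : ∀ (p : String) (q : List Char), p.toList = q ++ [':'] → (':' : Char) ∉ q →
        PySem.Str.startswith v p = decide (q = h) := by
      intro p q hp hq
      by_cases hqh : q = h
      · have hsw1 : PySem.Str.startswith v p = true := by
          rw [PySem.Str.startswith_eq, hp, PySem.Chars.startswith_iff]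
          exact (hiff q hq).2 hqh
        rw [hsw1, hqh]; simp
      · have hsw0 : PySem.Str.startswith v p = false := by
          rw [← Bool.not_eq_true, PySem.Str.startswith_eq, hp, PySem.Chars.startswith_iff]
          exact fun hx => hqh ((hiff q hq).1 hx)
        rw [hsw0]
        simp [hqh]
    have e1 := hsw "kagenti-deps:" "kagenti-deps".toList (by decide) (by decide)
    have e2 := hsw "kagenti:" "kagenti".toList (by decide) (by decide)
    have e3 := hsw "agentstack:" "agentstack".toList (by decide) (by decide)
    -- value[len(prefix):] is exactly the part after the first colon
    have hslice : ∀ (n : Int), n = ((h.length : Int) + 1) →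
        PySem.Str.slice v (some n) none = String.ofList rest := by
      intro n hn
      apply String.ext
      rw [PySem.Str.toList_slice, PySem.Chars.slice_eq_listSlice, hn,
        PySem.List.slice_from _ (by positivity), hv]
      have h2 : h ++ ':' :: rest = (h ++ [':']) ++ rest := by simp
      have hlen : ((h.length : Int) + 1).toNat = (h ++ [':']).length := by simp
      rw [h2, hlen, List.drop_left]
      simp
    by_cases h1 : h = "kagenti-deps".toList
    · have hA : pvInnerA v pvChartPrefixes d
          = d.modify "kagenti-deps" [] (· ++ [String.ofList rest]) := by
        simp only [pvInnerA, pvChartPrefixes, e1]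
        rw [if_pos (by rw [h1]; decide), hslice _ (by rw [h1]; decide),
          show pvRstripColon "kagenti-deps:" = "kagenti-deps" from by decide]
      have hB : pvStepB d v = d.modify "kagenti-deps" [] (· ++ [String.ofList rest]) := by
        simp only [pvStepB, ht, ← hh_def, h1]
        have : String.ofList "kagenti-deps".toList = "kagenti-deps" := by decide
        rw [this, hcont]
        simp [pvKeys]
      rw [hA, hB]
    · by_cases h2 : h = "kagenti".toList
      · have hA : pvInnerA v pvChartPrefixes d
            = d.modify "kagenti" [] (· ++ [String.ofList rest]) := by
          simp only [pvInnerA, pvChartPrefixes, e1, e2]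
          rw [if_neg (by rw [h2]; decide), if_pos (by rw [h2]; decide),
            hslice _ (by rw [h2]; decide),
            show pvRstripColon "kagenti:" = "kagenti" from by decide]
        have hB : pvStepB d v = d.modify "kagenti" [] (· ++ [String.ofList rest]) := by
          simp only [pvStepB, ht, ← hh_def, h2]
          have : String.ofList "kagenti".toList = "kagenti" := by decide
          rw [this, hcont]
          simp [pvKeys]
        rw [hA, hB]
      · by_cases h3 : h = "agentstack".toList
        · have hA : pvInnerA v pvChartPrefixes d
              = d.modify "agentstack" [] (· ++ [String.ofList rest]) := by
            simp only [pvInnerA, pvChartPrefixes, e1, e2, e3]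
            rw [if_neg (by rw [h3]; decide), if_neg (by rw [h3]; decide),
              if_pos (by rw [h3]; decide), hslice _ (by rw [h3]; decide),
              show pvRstripColon "agentstack:" = "agentstack" from by decide]
          have hB : pvStepB d v = d.modify "agentstack" [] (· ++ [String.ofList rest]) := by
            simp only [pvStepB, ht, ← hh_def, h3]
            have : String.ofList "agentstack".toList = "agentstack" := by decide
            rw [this, hcont]
            simp [pvKeys]
          rw [hA, hB]
        · -- colon present, but an unknown head: both sides append the full value
          have hA : pvInnerA v pvChartPrefixes d
              = d.modify "agentstack" [] (· ++ [v]) := by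
            simp only [pvInnerA, pvChartPrefixes, e1, e2, e3]
            rw [if_neg (fun hx => h1 (of_decide_eq_true hx).symm),
              if_neg (fun hx => h2 (of_decide_eq_true hx).symm),
              if_neg (fun hx => h3 (of_decide_eq_true hx).symm)]
          have hB : pvStepB d v = d.modify "agentstack" [] (· ++ [v]) := by
            simp only [pvStepB, ht, ← hh_def, hcont]
            have hmem : String.ofList h ∉ pvKeys := by
              intro hm
              have hlist : h = (String.ofList h).toList := by simp
              simp only [pvKeys, List.mem_cons, List.not_mem_nil, or_false] at hm
              rcases hm with hm | hm | hm
              · exact h3 (by rw [hlist, hm])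
              · exact h2 (by rw [hlist, hm])
              · exact h1 (by rw [hlist, hm])
            simp only [hmem, decide_false, Bool.false_eq_true, if_false]
          rw [hA, hB]

-- B's step keeps the key set: every modified key is already present
theorem pv_keys_stepB (d : PySem.Dict String (List String)) (v : String)
    (hk : d.keys = pvKeys) : (pvStepB d v).keys = pvKeys := by
  have hmod : ∀ (k : String) (f : List String → List String), k ∈ pvKeys →
      (d.modify k [] f).keys = pvKeys := by
    intro k f hmem
    rw [PySem.Dict.keys_modify, PySem.Dict.keys_insert_of_contains _ _
      ((PySem.Dict.contains_iff_mem_keys d k).2 (hk ▸ hmem))]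
    exact hk
  unfold pvStepB
  cases ht : v.toList.dropWhile (· ≠ ':') with
  | nil => exact hmod _ _ (by simp [pvKeys])
  | cons c rest =>
    by_cases hc : d.contains (String.ofList (v.toList.takeWhile (· ≠ ':')))
    · simp only [hc, if_true]
      exact hmod _ _ (hk ▸ (PySem.Dict.contains_iff_mem_keys d _).1 hc)
    · simp only [hc, Bool.false_eq_true, if_false]
      exact hmod _ _ (by simp [pvKeys])

theorem pv_fold_eq (l : List String) (d : PySem.Dict String (List String))
    (hk : d.keys = pvKeys) :
    l.foldl (fun d v => pvInnerA v pvChartPrefixes d) d = l.foldl pvStepB d := by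
  induction l generalizing d with
  | nil => rfl
  | cons v vs ih =>
    simp only [List.foldl_cons, pv_step_eq v d hk]
    exact ih _ (pv_keys_stepB d v hk)

-- ===== VERDICT (by name: the statement is the Claim_ definition above) =====
theorem parse_scoped_set_values_spec : Claim_equal_parse_scoped_set_values := by
  intro l _
  show parse_scoped_set_values l = parse_scoped_set_values_alt l
  unfold parse_scoped_set_values parse_scoped_set_values_alt
  rw [pv_fold_eq l pvInit (by decide)]
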